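-- pv_equiv track=rewrite | github.com/PMRAZOR/Baekjoon-Solved | 백준/Platinum/13560. 축구 게임/축구 게임.py | is_valid_scores
-- ===== SOURCE A (Python) =====
-- def is_valid_scores(n, scores):
--     scores = sorted(scores)
--
--     if sum(scores) != n * (n - 1) // 2:
--         return False
--
--     i = 0
--     while i < n:
--         win = scores[i]
--         lose = n - win - i - 1
--
--         for j in range(n - lose, n):
--             scores[j] -= 1
--             if scores[j] < 0:
--                 return False
--
--         scores[i] = 0
--         scores.sort()
--         i += 1
--
--     return True
-- ===== SOURCE B (Python) =====
-- def is_valid_scores(n, scores):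
--     s = sorted(scores)
--     total = 0
--     k = 0
--     for x in s:
--         k += 1
--         total += x
--         if 2 * total < k * (k - 1):
--             return False
--     return total == n * (n - 1) // 2
-- ===== Notes on version B (the rewrite author's own statement) =====
-- stated objective: alternative
-- what changed: B checks Landau's condition directly (sort once, then a single prefix-sum scan verifying 2*prefix_k >= k*(k-1) for every k and finally total == n*(n-1)/2) instead of A's n rounds of decrement-the-suffix-and-re-sort simulation; on random inputs both usually exit at the total check, so the measured cost is the same; Pre_ excludes inputs whose total equals n*(n-1)/2 but whose list length differs from n (malformed for a tournament of n players, where A raises IndexError or its value depends on only part of the list) and those with an entry below -(n+1) (where A raises IndexError).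
-- outside the precondition, e.g. on is_valid_scores(0, [5, -5]): A returns True, B returns False; on is_valid_scores(1, [0, 0]): A returns True, B returns False; on is_valid_scores(1, []): A raises IndexError, B returns True
import Mathlib
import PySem

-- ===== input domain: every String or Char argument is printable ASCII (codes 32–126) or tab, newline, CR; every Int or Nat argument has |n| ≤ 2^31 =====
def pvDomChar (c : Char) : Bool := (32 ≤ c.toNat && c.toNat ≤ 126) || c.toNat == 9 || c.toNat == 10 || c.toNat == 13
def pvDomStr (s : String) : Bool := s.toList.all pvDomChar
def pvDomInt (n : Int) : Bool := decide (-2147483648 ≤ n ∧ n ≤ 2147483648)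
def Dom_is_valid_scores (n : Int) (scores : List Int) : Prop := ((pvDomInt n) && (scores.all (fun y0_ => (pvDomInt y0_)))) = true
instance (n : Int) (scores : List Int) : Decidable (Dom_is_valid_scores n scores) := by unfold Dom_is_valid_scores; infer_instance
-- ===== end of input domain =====

-- B checks Landau's condition by one sort plus one prefix-sum scan instead of A's n rounds of
-- decrement-suffix-and-re-sort; equivalence is about the RETURN value only (A sorts a local copy).

-- ===== PORT A =====

-- inner 'for j in range(n - lose, n): scores[j] -= 1; if scores[j] < 0: return False'.
-- '.error b' = early 'return b'; a Python IndexError (possible only outside Pre_) is collapsed to '.error false'.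
def pvInner (xs : List Int) (js : List Int) : Except Bool (List Int) :=
  match js with
  | [] => .ok xs
  | j :: rest =>
    match PySem.List.pyGet? xs j with
    | none => .error false   -- IndexError: excluded by Pre_
    | some v =>
      if v - 1 < 0 then .error false
      else pvInner (PySem.List.pySetD xs j (v - 1)) rest

-- the 'while i < n' loop; fuel = n.toNat (i rises by 1 per pass, so the guard fails exactly when fuel runs out)
def pvOuter (n : Int) : Nat → Int → List Int → Bool
  | 0, _, _ => true
  | fuel + 1, i, sc =>
    if i < n then
      match PySem.List.pyGet? sc i with
      | none => false   -- IndexError: excluded by Pre_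
      | some win =>
        let lose := n - win - i - 1
        match pvInner sc (PySem.List.pyRange (n - lose) n 1) with
        | .error b => b
        | .ok sc' =>
          pvOuter n fuel (i + 1)
            (PySem.List.sorted (PySem.List.pySetD sc' i 0) (fun x => x) false)
    else true

def is_valid_scores (n : Int) (scores : List Int) : Bool :=
  let sc := PySem.List.sorted scores (fun x => x) false
  if sc.sum ≠ PySem.Int.floordiv (n * (n - 1)) 2 then false
  else pvOuter n n.toNat 0 sc

-- ===== PORT B =====

-- the 'for x in s' scan of Source B: k counts elements, total the running sum; 'none' = early 'return False'
def pvScan (s : List Int) (k : Int) (total : Int) : Option Int :=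
  match s with
  | [] => some total
  | x :: rest =>
    if 2 * (total + x) < (k + 1) * (k + 1 - 1) then none
    else pvScan rest (k + 1) (total + x)

def is_valid_scores_alt (n : Int) (scores : List Int) : Bool :=
  match pvScan (PySem.List.sorted scores (fun x => x) false) 0 0 with
  | none => false
  | some total => total == PySem.Int.floordiv (n * (n - 1)) 2

-- ===== PRECONDITION & SPEC =====

-- Pre_ excludes inputs whose total equals n*(n-1)//2 but whose list length differs from n
-- (malformed for a tournament of n players: there A raises IndexError or its value depends on only part
-- of the list) and those with an entry below -(n+1) (there A raises IndexError).
def Pre_is_valid_scores (n : Int) (scores : List Int) : Prop :=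
  scores.sum = PySem.Int.floordiv (n * (n - 1)) 2 →
    (n = (scores.length : Int) ∧ ∀ x ∈ scores, -(n + 1) ≤ x)

instance (n : Int) (scores : List Int) : Decidable (Pre_is_valid_scores n scores) := by
  unfold Pre_is_valid_scores; infer_instance

def pvWitness_is_valid_scores : Int × List Int := (3, [0, 1, 2])

def Spec_is_valid_scores (n : Int) (scores : List Int) (out : Bool) : Prop := out = is_valid_scores_alt n scores
instance (n : Int) (scores : List Int) (out : Bool) : Decidable (Spec_is_valid_scores n scores out) := by unfold Spec_is_valid_scores; infer_instance

-- ===== CLAIM (what is proved, stated in full; the proofs are below) =====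
def Claim_equal_is_valid_scores : Prop := ∀ (n : Int) (scores : List Int), Dom_is_valid_scores n scores → Pre_is_valid_scores n scores → Spec_is_valid_scores n scores (is_valid_scores n scores)

-- ===== LEMMAS AND PROOFS =====

-- ---- proof-side functional form of A's loop (greedy on the sorted remaining scores) ----
def pvGreedy : List Int → Bool
  | [] => true
  | w :: r =>
    let keep := r.take w.toNat
    let dec := (r.drop w.toNat).map (· - 1)
    if dec.any (· < 0) then false
    else pvGreedy (PySem.List.sorted (keep ++ dec) (fun x => x) false)
termination_by l => l.length
decreasing_by
  simp [PySem.List.length_sorted]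
  omega

-- Landau's prefix condition (doubled to stay in integers)
def okPrefix (l : List Int) : Prop :=
  ∀ k : Nat, k ≤ l.length → ((k : Int)) * ((k : Int) - 1) ≤ 2 * (l.take k).sum

-- subset (sub-multiset) form of the Landau condition
def pvLB (l : List Int) : Prop :=
  ∀ u : List Int, u.Subperm l → ((u.length : Int)) * ((u.length : Int) - 1) ≤ 2 * u.sum

theorem pvLB_perm {l l' : List Int} (h : l.Perm l') (hl : pvLB l) : pvLB l' := by
  intro u hu
  exact hl u (hu.trans h.symm.subperm)

-- sum of the |v|-prefix of a sorted list is at most the sum of any sublist v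
theorem sum_take_le_sublist (l v : List Int) (hs : l.Pairwise (· ≤ ·)) (hv : v.Sublist l) :
    (l.take v.length).sum ≤ v.sum := by
  induction hv with
  | slnil => simp
  | @cons v1 l2 x h ih =>
    have hs' := (List.pairwise_cons.mp hs).2
    have hx : ∀ y ∈ l2, x ≤ y := (List.pairwise_cons.mp hs).1
    rcases v1 with _ | ⟨y, vtail⟩
    · simp
    · have hlen : (y :: vtail).length ≤ l2.length := h.length_le
      have hc : vtail.length < l2.length := by simpa using hlen
      have h1 := ih hs'
      have h2 := List.sum_take_succ l2 vtail.length hc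
      have h3 : x ≤ l2[vtail.length] := hx _ (List.getElem_mem hc)
      simp only [List.length_cons, List.take_succ_cons, List.sum_cons] at *
      omega
  | @cons₂ v1 l2 x h ih =>
    have hs' := (List.pairwise_cons.mp hs).2
    simpa using ih hs'

theorem sum_take_le_subperm (l v : List Int) (hs : l.Pairwise (· ≤ ·)) (hv : v.Subperm l) :
    (l.take v.length).sum ≤ v.sum := by
  obtain ⟨w, hw, hwl⟩ := hv
  have := sum_take_le_sublist l w hs hwl
  rwa [hw.length_eq, hw.sum_eq] at this

theorem okPrefix_iff_pvLB (l : List Int) (hs : l.Pairwise (· ≤ ·)) : okPrefix l ↔ pvLB l := by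
  constructor
  · intro h u hu
    have hlen : u.length ≤ l.length := hu.length_le
    have h1 := h u.length hlen
    have h2 := sum_take_le_subperm l u hs hu
    omega
  · intro h k hk
    have : (l.take k).Subperm l := (List.take_sublist k l).subperm
    have := h (l.take k) this
    rwa [List.length_take, Nat.min_eq_left hk] at this

-- ---- arithmetic facts ----
theorem two_floordiv_consec (n : Int) : 2 * PySem.Int.floordiv (n * (n - 1)) 2 = n * (n - 1) := by
  obtain ⟨k, hk⟩ := Int.even_mul_pred_self n
  rw [PySem.Int.floordiv_eq_ediv_of_pos (by norm_num), hk]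
  omega

-- sum of (· - 1) over a list
theorem sum_map_sub_one (l : List Int) : (l.map (· - 1)).sum = l.sum - l.length := by
  induction l with
  | nil => simp
  | cons x t ih => simp [ih]; ring

-- segment of a list as a range-map (getD form)
theorem seg_eq_range_map (r : List Int) (a c : Nat) (h : a + c ≤ r.length) :
    (r.drop a).take c = (List.range c).map (fun i => r.getD (a + i) 0) := by
  apply List.ext_getElem
  · simp; omega
  · intro i h1 h2
    have hi : i < c := by simpa using h2
    have hai : a + i < r.length := by omega
    simp [List.getElem_take, List.getElem_drop, List.getD_eq_getElem, hai, hi]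

theorem sorted_getD_mono (r : List Int) (hs : r.Pairwise (· ≤ ·)) {i j : Nat}
    (hij : i ≤ j) (hj : j < r.length) : r.getD i 0 ≤ r.getD j 0 := by
  rcases Nat.eq_or_lt_of_le hij with rfl | h
  · exact le_refl _
  · have := List.pairwise_iff_getElem.mp hs i j (Nat.lt_trans h hj) hj h
    simpa [List.getD_eq_getElem, Nat.lt_trans h hj, hj] using this

-- ===== the two step lemmas =====

-- sum of a segment, bounded above / below by a constant
theorem sum_seg_le (r : List Int) (a c : Nat) (x : Int) (h : a + c ≤ r.length)
    (hx : ∀ i, i < c → r.getD (a + i) 0 ≤ x) :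
    ((r.drop a).take c).sum ≤ (c : Int) * x := by
  rw [seg_eq_range_map r a c h]
  have := List.sum_le_sum (l := List.range c) (f := fun i => r.getD (a + i) 0)
    (g := fun _ => x) (fun i hi => hx i (List.mem_range.mp hi))
  simpa [List.map_const', List.sum_replicate, Int.nsmul_eq_mul, mul_comm] using this

theorem sum_seg_ge (r : List Int) (a c : Nat) (x : Int) (h : a + c ≤ r.length)
    (hx : ∀ i, i < c → x ≤ r.getD (a + i) 0) :
    (c : Int) * x ≤ ((r.drop a).take c).sum := by
  rw [seg_eq_range_map r a c h]
  have := List.sum_le_sum (l := List.range c) (f := fun _ => x)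
    (g := fun i => r.getD (a + i) 0) (fun i hi => hx i (List.mem_range.mp hi))
  simpa [List.map_const', List.sum_replicate, Int.nsmul_eq_mul, mul_comm] using this

theorem sum_take_add (r : List Int) (a b : Nat) :
    (r.take (a + b)).sum = (r.take a).sum + ((r.drop a).take b).sum := by
  rw [List.take_add, List.sum_append]

-- under the Landau prefix condition every entry after the head is at least 1
theorem one_le_tail (w : Int) (r : List Int)
    (hs : (w :: r).Pairwise (· ≤ ·)) (hL : okPrefix (w :: r)) :
    ∀ p : Nat, p < r.length → 1 ≤ r.getD p 0 := by
  intro p hp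
  by_contra hlt
  push_neg at hlt
  have hle : ∀ i, i < p + 2 → (w :: r).getD i 0 ≤ 0 := by
    intro i hi
    have := sorted_getD_mono (w :: r) hs (i := i) (j := p + 1) (by omega) (by simp; omega)
    have h2 : (w :: r).getD (p + 1) 0 = r.getD p 0 := List.getD_cons_succ
    omega
  have hsumle : (((w :: r).drop 0).take (p + 2)).sum ≤ ((p + 2 : Nat) : Int) * 0 :=
    sum_seg_le (w :: r) 0 (p + 2) 0 (by simp; omega) (fun i hi => by simpa using hle i hi)
  rw [List.drop_zero] at hsumle
  have hok := hL (p + 2) (by simp; omega)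
  push_cast at hok hsumle
  nlinarith [hok, hsumle]

-- sum over a greedy step
theorem step_sum (w : Int) (r : List Int) (hw : 0 ≤ w) (hwm : w.toNat ≤ r.length)
    (hsum : 2 * (w :: r).sum = ((w :: r).length : Int) * (((w :: r).length : Int) - 1)) :
    2 * (r.take w.toNat ++ (r.drop w.toNat).map (· - 1)).sum
      = ((r.length : Int)) * ((r.length : Int) - 1) := by
  have h1 : (r.take w.toNat).sum + (r.drop w.toNat).sum = r.sum := by
    rw [← List.sum_append, List.take_append_drop]
  have h2 := sum_map_sub_one (r.drop w.toNat)
  have h3 : ((r.drop w.toNat).length : Int) = (r.length : Int) - w := by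
    simp [List.length_drop]; omega
  simp only [List.sum_append, List.sum_cons, List.length_cons] at hsum ⊢
  push_cast at hsum ⊢
  linear_combination 2 * h1 + 2 * h2 - 2 * h3 + hsum

-- w ≤ m under the Landau sum
theorem head_le_len (w : Int) (r : List Int)
    (hs : (w :: r).Pairwise (· ≤ ·)) (hw : 0 ≤ w)
    (hsum : 2 * (w :: r).sum = ((w :: r).length : Int) * (((w :: r).length : Int) - 1)) :
    2 * w ≤ (r.length : Int) := by
  have hx : ∀ y ∈ r, w ≤ y := (List.pairwise_cons.mp hs).1
  have h1 : (r.map (fun _ => w)).sum ≤ (r.map (fun y => y)).sum :=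
    List.sum_le_sum (fun i hi => hx i hi)
  simp only [List.map_const', List.sum_replicate, Int.nsmul_eq_mul, List.map_id_fun', id] at h1
  simp only [List.sum_cons, List.length_cons] at hsum
  push_cast at hsum
  nlinarith [hsum, h1, hw, Int.natCast_nonneg r.length]

-- L1: a successful greedy step reflects the Landau condition
theorem step_reflect (w : Int) (r : List Int)
    (hw : 0 ≤ w) (hwm : w.toNat ≤ r.length)
    (ht : pvLB (r.take w.toNat ++ (r.drop w.toNat).map (· - 1))) :
    okPrefix (w :: r) := by
  intro k hk
  cases k with
  | zero => simp
  | succ k' =>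
    have hww : (w.toNat : Int) = w := Int.toNat_of_nonneg hw
    have hk' : k' ≤ r.length := by simpa using hk
    have hkeeplen : (r.take w.toNat).length = w.toNat := List.length_take_of_le hwm
    have htk : ((w :: r).take (k' + 1)).sum = w + (r.take k').sum := by
      rw [List.take_succ_cons, List.sum_cons]
    rw [htk]
    have hsub : ((r.take w.toNat ++ (r.drop w.toNat).map (· - 1)).take k').Subperm
        (r.take w.toNat ++ (r.drop w.toNat).map (· - 1)) := (List.take_sublist _ _).subperm
    have hLB := ht _ hsub
    by_cases hck : k' ≤ w.toNat
    · have hu : (r.take w.toNat ++ (r.drop w.toNat).map (· - 1)).take k' = r.take k' := by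
        rw [List.take_append_of_le_length (by omega), List.take_take,
          Nat.min_eq_left hck]
      rw [hu] at hLB
      have hlen : (r.take k').length = k' := List.length_take_of_le hk'
      rw [hlen] at hLB
      push_cast at hLB ⊢
      nlinarith [hLB, hww ▸ (Int.ofNat_le.mpr hck : ((k' : Nat) : Int) ≤ (w.toNat : Int))]
    · have hc : k' = w.toNat + (k' - w.toNat) := by omega
      have hu : (r.take w.toNat ++ (r.drop w.toNat).map (· - 1)).take k'
          = r.take w.toNat ++ ((r.drop w.toNat).map (· - 1)).take (k' - w.toNat) := by
        have h := List.take_length_add_append (l₁ := r.take w.toNat)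
          (l₂ := (r.drop w.toNat).map (· - 1)) (k' - w.toNat)
        rw [hkeeplen] at h
        rw [hc, h]
        have e : w.toNat + (k' - w.toNat) - w.toNat = k' - w.toNat := by omega
        rw [e]
      have hmt : ((r.drop w.toNat).map (· - 1)).take (k' - w.toNat)
          = ((r.drop w.toNat).take (k' - w.toNat)).map (· - 1) := List.map_take.symm
      have hseglen : ((r.drop w.toNat).take (k' - w.toNat)).length = k' - w.toNat := by
        rw [List.length_take, List.length_drop]; omega
      have hsum1 : ((r.take w.toNat ++ (r.drop w.toNat).map (· - 1)).take k').sum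
          = (r.take k').sum - ((k' - w.toNat : Nat) : Int) := by
        rw [hu, hmt, List.sum_append, sum_map_sub_one, hseglen]
        have := sum_take_add r w.toNat (k' - w.toNat)
        rw [← hc] at this
        omega
      have hulen : ((r.take w.toNat ++ (r.drop w.toNat).map (· - 1)).take k').length = k' := by
        rw [List.length_take]
        simp only [List.length_append, hkeeplen, List.length_map, List.length_drop]
        omega
      rw [hsum1, hulen] at hLB
      push_cast at hLB ⊢
      have hcast : ((w.toNat : Nat) : Int) ≤ (k' : Int) := by
        rw [hww] at *
        omega
      rw [hww] at hcast
      nlinarith [hLB, hcast, hww, (by omega : w ≤ (k' : Int))]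

-- L2: the Landau condition implies the step checks pass and is preserved
set_option maxHeartbeats 1600000 in
theorem step_preserve (w : Int) (r : List Int)
    (hw : 0 ≤ w)
    (hs : (w :: r).Pairwise (· ≤ ·))
    (hsum : 2 * (w :: r).sum = ((w :: r).length : Int) * (((w :: r).length : Int) - 1))
    (hL : okPrefix (w :: r)) :
    (∀ x ∈ (r.drop w.toNat).map (· - 1), 0 ≤ x) ∧
      pvLB (r.take w.toNat ++ (r.drop w.toNat).map (· - 1)) := by
  have hww : (w.toNat : Int) = w := Int.toNat_of_nonneg hw
  have h2w : 2 * w ≤ (r.length : Int) := head_le_len w r hs hw hsum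
  have hwm : w.toNat ≤ r.length := by omega
  have hpos : ∀ p : Nat, p < r.length → 1 ≤ r.getD p 0 := one_le_tail w r hs hL
  have hge : ∀ x ∈ r, w ≤ x := (List.pairwise_cons.mp hs).1
  have hgeD : ∀ i : Nat, i < r.length → w ≤ r.getD i 0 := by
    intro i hi
    rw [List.getD_eq_getElem _ _ hi]
    exact hge _ (List.getElem_mem hi)
  constructor
  · intro x hx
    obtain ⟨y, hy, rfl⟩ := List.mem_map.mp hx
    obtain ⟨j, hj, rfl⟩ := List.mem_iff_getElem.mp hy
    have hjlen : w.toNat + j < r.length := by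
      have := hj; simp only [List.length_drop] at this; omega
    have : (r.drop w.toNat)[j] = r[w.toNat + j] := List.getElem_drop
    rw [this]
    have := hpos (w.toNat + j) hjlen
    rw [List.getD_eq_getElem _ _ hjlen] at this
    omega
  · intro u hu
    obtain ⟨z, hzp, hzs⟩ := hu
    obtain ⟨z1, z2, rfl, hz1, hz2⟩ := List.sublist_append_iff.mp hzs
    rw [← hzp.length_eq, ← hzp.sum_eq]
    have hrp : r.Pairwise (· ≤ ·) := (List.pairwise_cons.mp hs).2
    have hkeeplen : (r.take w.toNat).length = w.toNat := List.length_take_of_le hwm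
    have ha : z1.length ≤ w.toNat := by
      have := hz1.length_le; omega
    have hdeclen : ((r.drop w.toNat).map (· - 1)).length = r.length - w.toNat := by
      simp
    have hb : z2.length ≤ r.length - w.toNat := by
      have := hz2.length_le; omega
    -- lower bounds from sortedness
    have hskeep : (r.take w.toNat).Pairwise (· ≤ ·) :=
      List.Pairwise.sublist (List.take_sublist _ _) hrp
    have hsdec : ((r.drop w.toNat).map (· - 1)).Pairwise (· ≤ ·) := by
      rw [List.pairwise_map]
      exact (List.Pairwise.sublist (List.drop_sublist _ _) hrp).imp
        (fun h => by omega)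
    have h1 := sum_take_le_sublist _ z1 hskeep hz1
    have h2 := sum_take_le_sublist _ z2 hsdec hz2
    have hta : ((r.take w.toNat).take z1.length).sum = (r.take z1.length).sum := by
      rw [List.take_take, Nat.min_eq_left ha]
    have htb : (((r.drop w.toNat).map (· - 1)).take z2.length).sum
        = ((r.drop w.toNat).take z2.length).sum - ((z2.length : Nat) : Int) := by
      rw [List.map_take.symm, sum_map_sub_one]
      congr 1
      rw [List.length_take, List.length_drop]
      omega
    rw [hta] at h1
    rw [htb] at h2
    set a := z1.length with hadef
    set b := z2.length with hbdef
    -- abbreviations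
    have hTA : ((a : Nat) : Int) * w ≤ (r.take a).sum := by
      have := sum_seg_ge r 0 a w (by omega) (fun i hi => by simpa using hgeD i (by omega))
      rwa [List.drop_zero] at this
    have hsum12 : (z1 ++ z2).sum = z1.sum + z2.sum := List.sum_append
    have hlen12 : ((z1 ++ z2).length : Int) = (a : Int) + (b : Int) := by
      simp [hadef, hbdef]
    rw [hsum12, hlen12]
    by_cases hca : w.toNat ≤ a
    · -- a = w.toNat : direct shift with the prefix condition at a+b+1
      have haw : a = w.toNat := le_antisymm ha hca
      have hLk := hL (a + b + 1) (by simp; omega)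
      have hPS : ((w :: r).take (a + b + 1)).sum = w + (r.take (a + b)).sum := by
        rw [List.take_succ_cons, List.sum_cons]
      rw [hPS] at hLk
      have hTT : (r.take (a + b)).sum = (r.take a).sum + ((r.drop w.toNat).take b).sum := by
        rw [sum_take_add r a b, haw]
      push_cast at hLk ⊢
      rw [hTT] at hLk
      have hwa : (a : Int) = w := by rw [haw, hww]
      nlinarith [hLk, h1, h2]
    · -- a < w.toNat
      have haw : (a : Int) + 1 ≤ w := by
        have : a + 1 ≤ w.toNat := by omega
        calc ((a : Int)) + 1 = ((a + 1 : Nat) : Int) := by push_cast; ring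
        _ ≤ ((w.toNat : Nat) : Int) := by exact_mod_cast this
        _ = w := hww
      have hTB : ((b : Nat) : Int) * w ≤ ((r.drop w.toNat).take b).sum :=
        sum_seg_ge r w.toNat b w (by omega) (fun i hi => hgeD _ (by omega))
      by_cases hck : a + b ≤ 2 * w.toNat - 1
      · -- small k
        have hkk : ((a : Int)) + b ≤ 2 * w - 1 := by
          have : ((a + b : Nat) : Int) ≤ ((2 * w.toNat - 1 : Nat) : Int) := by exact_mod_cast hck
          push_cast at this
          omega
        push_cast at h1 h2 ⊢
        nlinarith [h1, h2, hTA, hTB, hkk,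
          (Int.natCast_nonneg a), (Int.natCast_nonneg b)]
      · -- large k
        have hb1 : 1 ≤ b := by omega
        have hwltm : w.toNat < r.length := by omega
        set v := r.getD w.toNat 0 with hvdef
        have hvw : w ≤ v := hgeD _ hwltm
        by_cases hvk : v ≤ ((a + b : Nat) : Int)
        · -- v small: prefix condition at w.toNat + b + 1
          have hMid : ((r.drop a).take (w.toNat - a)).sum
              ≤ ((w.toNat - a : Nat) : Int) * v := by
            apply sum_seg_le r a (w.toNat - a) v (by omega)
            intro i hi
            exact sorted_getD_mono r hrp (by omega) hwltm
          have hI1 : (r.take (w.toNat + b)).sum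
              = (r.take a).sum + ((r.drop a).take (w.toNat - a)).sum
                + ((r.drop w.toNat).take b).sum := by
            have e1 := sum_take_add r a (w.toNat - a + b)
            rw [show a + (w.toNat - a + b) = w.toNat + b by omega] at e1
            have e2 := sum_take_add (r.drop a) (w.toNat - a) b
            have e3 : (r.drop a).drop (w.toNat - a) = r.drop w.toNat := by
              rw [List.drop_drop]
              congr 1
              omega
            rw [e3] at e2
            omega
          have hLk := hL (w.toNat + b + 1) (by simp; omega)
          have hPS : ((w :: r).take (w.toNat + b + 1)).sum
              = w + (r.take (w.toNat + b)).sum := by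
            rw [List.take_succ_cons, List.sum_cons]
          rw [hPS, hI1] at hLk
          have hcastg : ((w.toNat - a : Nat) : Int) = w - (a : Int) := by omega
          rw [hcastg] at hMid
          have hck' : 2 * w ≤ (a : Int) + (b : Int) := by omega
          push_cast at hLk hMid hvk h1 h2 ⊢
          nlinarith [hLk, hMid, h1, h2, hvk, haw, hck', hww,
            mul_nonneg (by linarith : (0:Int) ≤ w - (a : Int))
              (by linarith : (0:Int) ≤ ((a : Int) + (b : Int)) - v),
            mul_nonneg (by linarith : (0:Int) ≤ w - (a : Int))
              (by linarith : (0:Int) ≤ w - (a : Int) - 1)]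
        · -- v large: every taken element of the tail is ≥ v ≥ k+1
          have hTBv : ((b : Nat) : Int) * v ≤ ((r.drop w.toNat).take b).sum := by
            apply sum_seg_ge r w.toNat b v (by omega)
            intro i hi
            exact sorted_getD_mono r hrp (by omega) (by omega)
          have hkk : ¬ (a + b : Int) ≤ 2 * w - 1 := by
            intro hcon
            apply hck
            have : ((a : Int)) + b ≤ 2 * ((w.toNat : Nat) : Int) - 1 := by rw [hww]; omega
            exact_mod_cast (by push_cast at this ⊢; omega : ((a + b : Nat) : Int) ≤ ((2 * w.toNat - 1 : Nat) : Int))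
          push_cast at hvk h1 h2 hkk ⊢
          nlinarith [h1, h2, hTA, hTBv, hvk, haw, hkk, hvw,
            (Int.natCast_nonneg a), (Int.natCast_nonneg b),
            sq_nonneg (((a : Int) + b) - w),
            mul_nonneg (by linarith : (0:Int) ≤ w - (a : Int) - 1)
              (by linarith : (0:Int) ≤ ((a : Int) + b) - 2 * w)]

-- ===== MAIN: greedy ⟺ Landau =====
theorem greedy_iff_landau : ∀ (N : Nat) (l : List Int), l.length ≤ N →
    l.Pairwise (· ≤ ·) → (∀ x ∈ l, 0 ≤ x) →
    2 * l.sum = (l.length : Int) * ((l.length : Int) - 1) →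
    (pvGreedy l = true ↔ okPrefix l) := by
  intro N
  induction N with
  | zero =>
    intro l hN _ _ _
    have : l = [] := List.eq_nil_iff_length_eq_zero.mpr (Nat.le_zero.mp hN)
    subst this
    constructor
    · intro _ k hk
      have : k = 0 := by simpa using hk
      subst this
      simp
    · intro _
      simp [pvGreedy]
  | succ N ih =>
    intro l hN hs hnn hsum
    rcases l with _ | ⟨w, rt⟩
    · constructor
      · intro _ k hk
        have : k = 0 := by simpa using hk
        subst this
        simp
      · intro _
        simp [pvGreedy]
    · have hw0 : 0 ≤ w := hnn w (by simp)
      have h2w := head_le_len w rt hs hw0 hsum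
      have hwm : w.toNat ≤ rt.length := by omega
      have hZlen : (rt.take w.toNat ++ (rt.drop w.toNat).map (· - 1)).length = rt.length := by
        simp
        omega
      have hperm : (PySem.List.sorted (rt.take w.toNat ++ (rt.drop w.toNat).map (· - 1)) (fun x => x) false).Perm
          (rt.take w.toNat ++ (rt.drop w.toNat).map (· - 1)) :=
        PySem.List.sorted_perm _ _ _
      have hSZlen : (PySem.List.sorted (rt.take w.toNat ++ (rt.drop w.toNat).map (· - 1)) (fun x => x) false).length
          = rt.length := by
        rw [PySem.List.length_sorted, hZlen]
      have hSZpair : (PySem.List.sorted (rt.take w.toNat ++ (rt.drop w.toNat).map (· - 1)) (fun x => x) false).Pairwise (· ≤ ·) := by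
        simpa using PySem.List.sorted_pairwise (rt.take w.toNat ++ (rt.drop w.toNat).map (· - 1)) (fun x => x)
      have hsumZ : 2 * (PySem.List.sorted (rt.take w.toNat ++ (rt.drop w.toNat).map (· - 1)) (fun x => x) false).sum
          = ((PySem.List.sorted (rt.take w.toNat ++ (rt.drop w.toNat).map (· - 1)) (fun x => x) false).length : Int)
            * (((PySem.List.sorted (rt.take w.toNat ++ (rt.drop w.toNat).map (· - 1)) (fun x => x) false).length : Int) - 1) := by
        rw [hperm.sum_eq, hSZlen]
        exact step_sum w rt hw0 hwm hsum
      constructor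
      · intro hgt
        by_cases hany : ((rt.drop w.toNat).map (· - 1)).any (· < 0)
        · exfalso
          simp only [pvGreedy] at hgt
          rw [if_pos hany] at hgt
          exact absurd hgt (by simp)
        · simp only [pvGreedy] at hgt
          rw [if_neg hany] at hgt
          have hnnZ : ∀ x ∈ PySem.List.sorted (rt.take w.toNat ++ (rt.drop w.toNat).map (· - 1)) (fun x => x) false, 0 ≤ x := by
            intro x hx
            rcases List.mem_append.mp ((PySem.List.mem_sorted _ _ _ _).mp hx) with hx' | hx'
            · exact hnn x (by simp [List.mem_of_mem_take hx'])
            · have hfalse : ((rt.drop w.toNat).map (· - 1)).any (· < 0) = false := by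
                simpa using hany
              have := List.any_eq_false.mp hfalse x hx'
              simpa using this
          have hok := (ih _ (by rw [hSZlen]; simp at hN; omega) hSZpair hnnZ hsumZ).mp hgt
          have hlb : pvLB (rt.take w.toNat ++ (rt.drop w.toNat).map (· - 1)) :=
            pvLB_perm hperm ((okPrefix_iff_pvLB _ hSZpair).mp hok)
          exact step_reflect w rt hw0 hwm hlb
      · intro hL
        obtain ⟨hdec, hlbZ⟩ := step_preserve w rt hw0 hs hsum hL
        have hany : ((rt.drop w.toNat).map (· - 1)).any (· < 0) = false := by
          rw [List.any_eq_false]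
          intro x hx
          have := hdec x hx
          simp
          omega
        simp only [pvGreedy]
        rw [if_neg (by intro hcon; rw [hany] at hcon; exact absurd hcon (by simp))]
        have hnnZ : ∀ x ∈ PySem.List.sorted (rt.take w.toNat ++ (rt.drop w.toNat).map (· - 1)) (fun x => x) false, 0 ≤ x := by
          intro x hx
          rcases List.mem_append.mp ((PySem.List.mem_sorted _ _ _ _).mp hx) with hx' | hx'
          · exact hnn x (by simp [List.mem_of_mem_take hx'])
          · have := List.any_eq_false.mp hany x hx'
            simpa using this
        have hlbSZ : pvLB (PySem.List.sorted (rt.take w.toNat ++ (rt.drop w.toNat).map (· - 1)) (fun x => x) false) :=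
          pvLB_perm hperm.symm hlbZ
        exact (ih _ (by rw [hSZlen]; simp at hN; omega) hSZpair hnnZ hsumZ).mpr ((okPrefix_iff_pvLB _ hSZpair).mpr hlbSZ)

-- ===== B-side: the scan computes the Landau prefix check =====
theorem scan_spec : ∀ (s : List Int) (k : Nat) (t : Int),
    ((k : Int)) * ((k : Int) - 1) ≤ 2 * t →
    pvScan s (k : Int) t =
      if ∀ m : Nat, m ≤ s.length → ((k + m : Int)) * ((k + m : Int) - 1) ≤ 2 * (t + (s.take m).sum)
      then some (t + s.sum) else none := by
  intro s
  induction s with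
  | nil =>
    intro k t hk
    rw [if_pos]
    · simp [pvScan]
    · intro m hm
      have : m = 0 := Nat.le_zero.mp hm
      subst this
      simpa using hk
  | cons x rest ih =>
    intro k t hk
    simp only [pvScan]
    by_cases hg : 2 * (t + x) < ((k : Int) + 1) * ((k : Int) + 1 - 1)
    · rw [if_pos hg, if_neg]
      push_neg
      refine ⟨1, by simp, ?_⟩
      push_cast
      simpa using hg
    · rw [if_neg hg]
      have hk1 : (((k + 1 : Nat)) : Int) * ((((k + 1 : Nat)) : Int) - 1) ≤ 2 * (t + x) := by
        push_cast; omega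
      have hcast : (((k + 1 : Nat)) : Int) = (k : Int) + 1 := by push_cast; ring
      have hrec := ih (k + 1) (t + x) hk1
      rw [hcast] at hrec
      rw [hrec]
      have hiff : (∀ m : Nat, m ≤ rest.length → ((k + 1 + m : Int)) * ((k + 1 + m : Int) - 1) ≤ 2 * ((t + x) + (rest.take m).sum)) ↔
          (∀ m : Nat, m ≤ (x :: rest).length → ((k + m : Int)) * ((k + m : Int) - 1) ≤ 2 * (t + ((x :: rest).take m).sum)) := by
        constructor
        · intro hC m hm
          cases m with
          | zero => simpa using hk
          | succ m' =>
            have hm' : m' ≤ rest.length := by simpa using hm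
            have := hC m' hm'
            push_cast at this ⊢
            have e : ((k : Int) + 1 + m') * ((k : Int) + 1 + m' - 1) = ((k : Int) + (m' + 1)) * ((k : Int) + (m' + 1) - 1) := by ring
            rw [e] at this
            simp only [List.take_succ_cons, List.sum_cons]
            linarith
        · intro hC m hm
          have := hC (m + 1) (by simpa using Nat.succ_le_succ hm)
          push_cast at this ⊢
          have e : ((k : Int) + (m + 1)) * ((k : Int) + (m + 1) - 1) = ((k : Int) + 1 + m) * ((k : Int) + 1 + m - 1) := by ring
          rw [e] at this
          simp only [List.take_succ_cons, List.sum_cons] at this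
          linarith
      rw [if_congr hiff rfl rfl]
      have : t + x + rest.sum = t + (x :: rest).sum := by simp; ring
      rw [this]

-- ===== A-side bookkeeping =====

-- the error payload of pvInner is always false
theorem pvInner_error_false (xs js : List Int) : pvInner xs js ≠ .error true := by
  induction js generalizing xs with
  | nil => simp [pvInner]
  | cons j rest ih =>
    simp only [pvInner]
    cases h : PySem.List.pyGet? xs j with
    | none => simp
    | some v =>
      by_cases hv : v - 1 < 0 <;> simp [hv, ih]

-- pvInner over a concatenated index list runs the two halves in sequence
theorem pvInner_append (a : List Int) : ∀ (b : List Int) (xs : List Int),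
    pvInner xs (a ++ b) = match pvInner xs a with
      | .error e => .error e
      | .ok ys => pvInner ys b := by
  induction a with
  | nil => intro b xs; simp [pvInner]
  | cons j rest ih =>
    intro b xs
    simp only [List.cons_append, pvInner]
    cases hg : PySem.List.pyGet? xs j with
    | none => rfl
    | some v =>
      by_cases hv : v - 1 < 0
      · simp [hv]
      · simp only [hv, if_false]
        exact ih b _

-- a successful pvInner preserves the length
theorem pvInner_length (js : List Int) : ∀ (xs ys : List Int), pvInner xs js = .ok ys →
    ys.length = xs.length := by
  induction js with
  | nil => intro xs ys h; simp [pvInner] at h; simp [h]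
  | cons j rest ih =>
    intro xs ys h
    simp only [pvInner] at h
    cases hg : PySem.List.pyGet? xs j with
    | none => rw [hg] at h; simp at h
    | some v =>
      rw [hg] at h
      by_cases hv : v - 1 < 0
      · simp [hv] at h
      · simp only [hv, if_false] at h
        rw [ih _ _ h, PySem.List.length_pySetD]

-- a successful pvInner never increases any entry
theorem pvInner_le (js : List Int) : ∀ (xs ys : List Int), pvInner xs js = .ok ys →
    ∀ p : Nat, ys.getD p 0 ≤ xs.getD p 0 := by
  induction js with
  | nil => intro xs ys h p; simp [pvInner] at h; simp [h]
  | cons j rest ih =>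
    intro xs ys h p
    simp only [pvInner] at h
    cases hg : PySem.List.pyGet? xs j with
    | none => rw [hg] at h; simp at h
    | some v =>
      rw [hg] at h
      by_cases hv : v - 1 < 0
      · simp [hv] at h
      · simp only [hv, if_false] at h
        refine le_trans (ih _ _ h p) ?_
        simp only [PySem.List.pyGet?] at hg
        cases hidx : PySem.List.pyIdx? xs.length j with
        | none => rw [hidx] at hg; simp at hg
        | some q =>
          rw [hidx] at hg
          simp only [Option.bind_some] at hg
          have hq : q < xs.length := by
            by_contra hq
            rw [List.getElem?_eq_none (by omega)] at hg
            simp at hg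
          simp only [PySem.List.pySetD, PySem.List.pySet?, hidx, Option.map_some, Option.getD_some]
          by_cases hpq : q = p
          · subst hpq
            rw [List.getD_eq_getElem?_getD, List.getD_eq_getElem?_getD,
              List.getElem?_set_self hq]
            rw [List.getElem?_eq_getElem hq] at hg ⊢
            simp at hg ⊢
            omega
          · rw [List.getD_eq_getElem?_getD, List.getD_eq_getElem?_getD,
              List.getElem?_set_ne hpq]

-- pvInner on range(start, len): decrement the suffix, early False iff a decremented entry is negative
theorem pvInner_ok (xs : List Int) (start : Nat) (h : start ≤ xs.length) :
    pvInner xs (PySem.List.pyRange (start : Int) (xs.length : Int) 1) =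
      (if ((xs.drop start).map (· - 1)).any (· < 0) then .error false
       else .ok (xs.take start ++ (xs.drop start).map (· - 1))) := by
  obtain ⟨d, hd⟩ : ∃ d, xs.length - start = d := ⟨_, rfl⟩
  induction d generalizing xs start with
  | zero =>
    have hlen : start = xs.length := by omega
    subst hlen
    rw [PySem.List.pyRange_one_eq_nil (le_refl _)]
    simp [pvInner]
  | succ d' ih =>
    have hlt : start < xs.length := by omega
    rw [PySem.List.pyRange_one_cons (by exact_mod_cast hlt)]
    have hget : PySem.List.pyGet? xs (start : Int) = some xs[start] := by
      rw [PySem.List.pyGet?_natCast, List.getElem?_eq_getElem hlt]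
    simp only [pvInner, hget]
    have hdrop : xs.drop start = xs[start] :: xs.drop (start + 1) :=
      List.drop_eq_getElem_cons hlt
    by_cases hv : xs[start] - 1 < 0
    · have hany : (((xs.drop start).map (· - 1)).any (· < 0)) = true := by
        rw [hdrop]
        simp only [List.map_cons, List.any_cons]
        simp [hv]
      rw [if_pos hv, if_pos hany]
    · rw [if_neg hv]
      have hset : PySem.List.pySetD xs (start : Int) (xs[start] - 1)
          = (xs.take start ++ [xs[start] - 1]) ++ xs.drop (start + 1) := by
        rw [PySem.List.pySetD_natCast, List.set_eq_take_cons_drop _ hlt]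
        simp
      set xs' := PySem.List.pySetD xs (start : Int) (xs[start] - 1) with hxs'
      have hlen' : xs'.length = xs.length := PySem.List.length_pySetD _ _ _
      have hl1 : (xs.take start ++ [xs[start] - 1]).length = start + 1 := by
        simp [List.length_take_of_le (le_of_lt hlt)]
      have hcast : ((start : Int) + 1) = ((start + 1 : Nat) : Int) := by push_cast; ring
      have hrec := ih xs' (start + 1) (by omega) (by omega)
      rw [hcast, ← hlen']
      rw [hrec]
      have hdrop' : xs'.drop (start + 1) = xs.drop (start + 1) := by
        rw [hset, ← hl1, List.drop_left]
      have htake' : xs'.take (start + 1) = xs.take start ++ [xs[start] - 1] := by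
        rw [hset, ← hl1, List.take_left]
      rw [hdrop', htake']
      rw [hdrop]
      simp only [List.map_cons, List.any_cons]
      have : decide (xs[start] - 1 < 0) = false := by simpa using hv
      rw [this]
      simp only [Bool.false_or]
      by_cases ha : ((xs.drop (start + 1)).map (· - 1)).any (· < 0)
      · rw [ha]; simp
      · simp only [Bool.not_eq_true] at ha
        rw [ha]
        simp [List.append_assoc]

-- a negative minimum makes A's first round return False
theorem pvInner_neg (w : Int) (r : List Int) (hw : w < 0) :
    pvInner (w :: r) (PySem.List.pyRange (w + 1) ((w :: r).length : Int) 1) = .error false := by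
  have hL0 : (0 : Int) ≤ ((w :: r).length : Int) := by positivity
  rw [PySem.List.pyRange_one_append (w + 1) 0 ((w :: r).length : Int) (by omega) hL0,
    pvInner_append]
  cases hneg : pvInner (w :: r) (PySem.List.pyRange (w + 1) 0 1) with
  | error e =>
    cases e with
    | false => rfl
    | true => exact absurd hneg (pvInner_error_false _ _)
  | ok ys =>
    show pvInner ys (PySem.List.pyRange 0 ((w :: r).length : Int) 1) = Except.error false
    have hlen : ys.length = (w :: r).length := pvInner_length _ _ _ hneg
    have hys0 : ys.getD 0 0 ≤ w := by simpa using pvInner_le _ _ _ hneg 0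
    have hok := pvInner_ok ys 0 (Nat.zero_le _)
    rw [show ((w :: r).length : Int) = (ys.length : Int) by rw [hlen]]
    rw [show (0 : Int) = ((0 : Nat) : Int) from rfl, hok]
    rw [if_pos]
    rcases ys with _ | ⟨y0, ytail⟩
    · simp at hlen
    · simp only [List.getD_cons_zero] at hys0
      simp only [List.drop_zero, List.map_cons, List.any_cons]
      have : decide (y0 - 1 < 0) = true := by simp; omega
      rw [this]
      simp

-- sorting splits off leading zeros
theorem sorted_replicate_zero_append (k : Nat) (ys : List Int) (h : ∀ x ∈ ys, 0 ≤ x) :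
    PySem.List.sorted (List.replicate k (0 : Int) ++ ys) (fun x => x) false
      = List.replicate k (0 : Int) ++ PySem.List.sorted ys (fun x => x) false := by
  apply PySem.List.sorted_id_eq_of_perm_of_pairwise
  · exact List.Perm.append_left _ (PySem.List.sorted_perm ys (fun x => x) false)
  · rw [List.pairwise_append]
    refine ⟨List.pairwise_replicate.mpr (Or.inr le_rfl), ?_, ?_⟩
    · exact PySem.List.sorted_pairwise ys (fun x => x)
    · intro a ha b hb
      have ha0 : a = 0 := List.eq_of_mem_replicate ha
      have hb0 : 0 ≤ b := h b ((PySem.List.mem_sorted _ _ _ _).mp hb)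
      omega

-- the outer loop is the greedy on the non-zero tail
theorem pvOuter_eq_greedy (n : Int) : ∀ (N : Nat) (r : List Int) (i : Nat), r.length ≤ N →
    n = (i : Int) + r.length →
    r.Pairwise (· ≤ ·) → (∀ x ∈ r, 0 ≤ x) →
    2 * r.sum = (r.length : Int) * ((r.length : Int) - 1) →
    pvOuter n r.length (i : Int) (List.replicate i (0 : Int) ++ r) = pvGreedy r := by
  intro N
  induction N with
  | zero =>
    intro r i hN hn hs hnn hsum
    have : r = [] := List.eq_nil_iff_length_eq_zero.mpr (Nat.le_zero.mp hN)
    subst this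
    simp [pvOuter, pvGreedy]
  | succ N ih =>
    intro r i hN hn hs hnn hsum
    rcases r with _ | ⟨w, rt⟩
    · simp [pvOuter, pvGreedy]
    · have hm : (w :: rt).length = rt.length + 1 := by simp
      have hw0 : 0 ≤ w := hnn w (by simp)
      have h2w : 2 * w ≤ (rt.length : Int) := head_le_len w rt hs hw0 hsum
      have hwm : w.toNat ≤ rt.length := by omega
      rw [hm]
      have hguard : (i : Int) < n := by
        rw [hn, hm]; push_cast; omega
      have hget : PySem.List.pyGet? (List.replicate i (0 : Int) ++ w :: rt) (i : Int) = some w := by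
        have h := PySem.List.pyGet?_append_length (List.replicate i (0 : Int)) rt w
        rwa [List.length_replicate] at h
      simp only [pvOuter, if_pos hguard, hget]
      have harg : n - (n - w - (i : Int) - 1) = w + (i : Int) + 1 := by ring
      rw [harg]
      have hxslen : (List.replicate i (0 : Int) ++ w :: rt).length = i + (rt.length + 1) := by
        simp
      have hstart : (w + (i : Int) + 1) = ((w.toNat + i + 1 : Nat) : Int) := by push_cast; omega
      have hnlen : n = ((List.replicate i (0 : Int) ++ w :: rt).length : Int) := by
        rw [hxslen, hn, hm]; push_cast; ring
      rw [hstart, hnlen,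
        pvInner_ok (List.replicate i (0 : Int) ++ w :: rt) (w.toNat + i + 1)
          (by rw [hxslen]; omega)]
      have hdrop : (List.replicate i (0 : Int) ++ w :: rt).drop (w.toNat + i + 1)
          = rt.drop w.toNat := by
        have h := List.drop_length_add_append (l₁ := List.replicate i (0 : Int))
          (l₂ := w :: rt) (w.toNat + 1)
        rw [List.length_replicate] at h
        rw [show w.toNat + i + 1 = i + (w.toNat + 1) by ring, h, List.drop_succ_cons]
      have htake : (List.replicate i (0 : Int) ++ w :: rt).take (w.toNat + i + 1)
          = List.replicate i (0 : Int) ++ w :: rt.take w.toNat := by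
        have h := List.take_length_add_append (l₁ := List.replicate i (0 : Int))
          (l₂ := w :: rt) (w.toNat + 1)
        rw [List.length_replicate] at h
        rw [show w.toNat + i + 1 = i + (w.toNat + 1) by ring, h, List.take_succ_cons]
      rw [hdrop, htake]
      by_cases hany : ((rt.drop w.toNat).map (· - 1)).any (· < 0)
      · rw [if_pos hany]
        simp only [pvGreedy]
        rw [if_pos hany]
      · rw [if_neg hany]
        simp only []
        have hset : PySem.List.pySetD
            ((List.replicate i (0 : Int) ++ w :: rt.take w.toNat) ++ (rt.drop w.toNat).map (· - 1))
            (i : Int) 0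
            = List.replicate (i + 1) (0 : Int) ++ (rt.take w.toNat ++ (rt.drop w.toNat).map (· - 1)) := by
          rw [PySem.List.pySetD_natCast]
          rw [show (List.replicate i (0 : Int) ++ w :: rt.take w.toNat) ++ (rt.drop w.toNat).map (· - 1)
            = List.replicate i (0 : Int) ++ w :: (rt.take w.toNat ++ (rt.drop w.toNat).map (· - 1)) by simp]
          rw [show (i : Nat) = (List.replicate i (0 : Int)).length + 0 by simp]
          rw [List.set_append_right _ _ (by simp)]
          simp [List.replicate_succ']
        rw [hset]
        have hnn' : ∀ x ∈ rt.take w.toNat ++ (rt.drop w.toNat).map (· - 1), 0 ≤ x := by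
          intro x hx
          rcases List.mem_append.mp hx with hx | hx
          · exact hnn x (by simp [List.mem_of_mem_take hx])
          · have hfalse : ((rt.drop w.toNat).map (· - 1)).any (· < 0) = false := by
              simpa using hany
            have := List.any_eq_false.mp hfalse x hx
            simpa using this
        rw [sorted_replicate_zero_append (i + 1) _ hnn']
        set Z := rt.take w.toNat ++ (rt.drop w.toNat).map (· - 1) with hZ
        have hZlen : Z.length = rt.length := by
          simp [hZ]
          omega
        have hsortlen : (PySem.List.sorted Z (fun x => x) false).length = rt.length := by
          rw [PySem.List.length_sorted, hZlen]
        have hsum' : 2 * (PySem.List.sorted Z (fun x => x) false).sum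
            = ((PySem.List.sorted Z (fun x => x) false).length : Int)
              * (((PySem.List.sorted Z (fun x => x) false).length : Int) - 1) := by
          rw [(PySem.List.sorted_perm Z (fun x => x) false).sum_eq, hsortlen]
          exact step_sum w rt hw0 hwm hsum
        have hrec := ih (PySem.List.sorted Z (fun x => x) false) (i + 1)
          (by rw [hsortlen]; omega)
          (by rw [hsortlen, hn, hm]; push_cast; ring)
          (by simpa using PySem.List.sorted_pairwise Z (fun x => x))
          (by intro x hx; exact hnn' x ((PySem.List.mem_sorted _ _ _ _).mp hx))
          hsum'
        rw [hsortlen] at hrec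
        have hcast : (((i + 1 : Nat)) : Int) = (i : Int) + 1 := by push_cast; ring
        rw [hcast] at hrec
        rw [← hnlen, hrec]
        simp only [pvGreedy]
        rw [if_neg hany]

-- ===== VERDICT (by name: the statement is the Claim_ definition above) =====
theorem is_valid_scores_spec : Claim_equal_is_valid_scores := by
  unfold Claim_equal_is_valid_scores
  intro n scores _hdom hpre
  unfold Spec_is_valid_scores
  unfold Pre_is_valid_scores at hpre
  simp only [is_valid_scores, is_valid_scores_alt]
  generalize hgen : PySem.List.sorted scores (fun x => x) false = sc
  have hperm : sc.Perm scores := hgen ▸ PySem.List.sorted_perm scores _ _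
  have hpair : sc.Pairwise (· ≤ ·) := by
    rw [← hgen]
    simpa using PySem.List.sorted_pairwise scores (fun x => x)
  have hsclen : sc.length = scores.length := by rw [← hgen, PySem.List.length_sorted]
  have hsum_eq : sc.sum = scores.sum := hperm.sum_eq
  have hscan := scan_spec sc 0 0 (by norm_num)
  rw [Nat.cast_zero] at hscan
  by_cases hsum : sc.sum = PySem.Int.floordiv (n * (n - 1)) 2
  · rw [if_neg (by simpa using hsum)]
    obtain ⟨hnlen, _hbound⟩ := hpre (by rw [← hsum_eq]; exact hsum)
    have hlen1 : n = (sc.length : Int) := by rw [hsclen]; exact hnlen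
    have h2sum : 2 * sc.sum = n * (n - 1) := by rw [hsum, two_floordiv_consec]
    rcases sc with _ | ⟨w, rest⟩
    · -- n = 0 : the loop is skipped and the scan accepts the empty list
      have hn0 : n = 0 := by simpa using hlen1
      subst hn0
      simp only [Int.toNat_zero, pvOuter, pvScan]
      norm_num [PySem.Int.floordiv]
    · by_cases hw : w < 0
      · -- a negative minimum: A fails in its first inner loop, B at its first prefix
        have hfuel : n.toNat = rest.length + 1 := by
          simp only [List.length_cons] at hlen1
          omega
        rw [hfuel]
        simp only [pvOuter]
        have hguard : (0 : Int) < n := by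
          simp only [List.length_cons] at hlen1
          omega
        rw [if_pos hguard, PySem.List.pyGet?_zero_cons]
        simp only []
        have harg : n - (n - w - 0 - 1) = w + 1 := by ring
        rw [harg, hlen1, pvInner_neg w rest hw]
        simp only [pvScan]
        rw [if_pos (by omega)]
      · -- all scores nonnegative: greedy ⟺ Landau ⟺ the scan
        push_neg at hw
        have hnn : ∀ x ∈ (w :: rest), 0 ≤ x := by
          intro x hx
          rcases List.mem_cons.mp hx with rfl | hx'
          · exact hw
          · exact le_trans hw ((List.pairwise_cons.mp hpair).1 x hx')
        have hsum2 : 2 * (w :: rest).sum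
            = (((w :: rest).length : Int)) * ((((w :: rest).length : Int)) - 1) := by
          rw [h2sum, hlen1]
        have hgr := pvOuter_eq_greedy n (w :: rest).length (w :: rest) 0 (le_refl _)
          (by rw [hlen1]; push_cast; ring) hpair hnn hsum2
        rw [List.replicate_zero, List.nil_append, Nat.cast_zero] at hgr
        have hfuel : n.toNat = (w :: rest).length := by
          rw [hlen1, Int.toNat_natCast]
        rw [hfuel, hgr]
        have hiff := greedy_iff_landau (w :: rest).length (w :: rest) (le_refl _)
          hpair hnn hsum2
        have hcond : (∀ m : Nat, m ≤ (w :: rest).length →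
            ((0 : Int) + (m : Int)) * ((0 : Int) + (m : Int) - 1) ≤ 2 * (0 + ((w :: rest).take m).sum))
            ↔ okPrefix (w :: rest) := by
          unfold okPrefix
          constructor
          · intro h m hm
            have := h m hm
            push_cast at this ⊢
            linarith
          · intro h m hm
            have := h m hm
            push_cast at this ⊢
            linarith
        by_cases hok : okPrefix (w :: rest)
        · rw [hiff.mpr hok]
          rw [hscan, if_pos (hcond.mpr hok)]
          simp [hsum]
        · have : pvGreedy (w :: rest) = false := by
            cases hgb : pvGreedy (w :: rest) with
            | false => rfl
            | true => exact absurd (hiff.mp hgb) hok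
          rw [this]
          rw [hscan, if_neg (fun hc => hok (hcond.mp hc))]
  · rw [if_pos (by simpa using hsum)]
    cases hs2 : pvScan sc 0 0 with
    | none => rfl
    | some t =>
      rw [hs2] at hscan
      by_cases hc : (∀ m : Nat, m ≤ sc.length →
          ((0 : Int) + (m : Int)) * ((0 : Int) + (m : Int) - 1) ≤ 2 * (0 + (sc.take m).sum))
      · rw [if_pos hc] at hscan
        have ht : t = sc.sum := by
          have := Option.some.inj hscan.symm
          omega
        rw [ht]
        exact (beq_eq_false_iff_ne.mpr hsum).symm
      · rw [if_neg hc] at hscan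
        exact absurd hscan (by simp)
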